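-- pv_equiv track=rewrite | github.com/natsuki-kining/python-demo | interview-questions/leetcode/find-words-that-can-be-formed-by-characters.py | count_characters_4
-- ===== SOURCE A (Python) =====
-- def count_characters_4(words, chars):
--     length = 0
--     dictionary_char = get_dictionary(chars)
--     for word in words:
--         dictionary_word = get_dictionary(word)
--         count = 0
--         word_length = len(word)
--
--         for w in word:
--             if(dictionary_char.get(w,0) >= dictionary_word.get(w,0)):
--                 count += 1
--
--         if(count == word_length):
--             length += word_length
--
--     return length
--
-- def get_dictionary(chars):
--     dictionary_char = {}
--     for c in chars:
--         count = dictionary_char.get(c,0)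
--         if(count == 0) :
--             dictionary_char[c] = 1
--         else:
--             count += 1
--             dictionary_char[c] = count
--     return dictionary_char;
-- ===== SOURCE B (Python) =====
-- def count_characters_4(words, chars):
--     # Sort-and-merge instead of frequency dicts: word is formable from chars
--     # iff sorted(word) is a subsequence of sorted(chars); check it by greedily
--     # consuming a fresh iterator over the sorted pool for each word.
--     pool = sorted(chars)
--     total = 0
--     for word in words:
--         it = iter(pool)
--         if all(c in it for c in sorted(word)):
--             total += len(word)
--     return total
-- ===== Notes on version B (the rewrite author's own statement) =====
-- stated objective: alternative
-- what changed: Replaces A's frequency-dict counting (a hand-built dict per word plus a per-position match-counting loop) with a sort-and-merge strategy: sort chars once, sort each word, and test formability as a greedy subsequence scan of the sorted word through a fresh iterator over the sorted pool (all(c in it)); no dictionaries at all, trading A's linear counting for sorting plus one pool scan per word (slower on large pools).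
import Mathlib
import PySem

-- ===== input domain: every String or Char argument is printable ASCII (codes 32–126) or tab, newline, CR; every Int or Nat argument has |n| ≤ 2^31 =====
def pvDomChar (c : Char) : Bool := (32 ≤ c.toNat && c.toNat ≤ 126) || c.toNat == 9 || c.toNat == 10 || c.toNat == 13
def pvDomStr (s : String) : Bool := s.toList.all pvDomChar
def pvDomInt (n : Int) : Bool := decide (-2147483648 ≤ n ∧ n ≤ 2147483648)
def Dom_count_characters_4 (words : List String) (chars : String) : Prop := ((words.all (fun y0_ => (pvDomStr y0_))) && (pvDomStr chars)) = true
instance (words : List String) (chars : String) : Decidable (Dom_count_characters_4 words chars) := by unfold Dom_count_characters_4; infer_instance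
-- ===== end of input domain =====

-- B replaces A's frequency-dict counting with a sort-and-merge strategy: sort chars once, sort
-- each word, and test formability as a greedy subsequence scan through the sorted pool.

-- ===== PORT A =====
-- helper get_dictionary: manual character-count dict
def get_dictionary (chars : List Char) : PySem.Dict Char Int :=
  chars.foldl (fun dictionary_char c =>
    let count := dictionary_char.getD c 0
    if count == 0 then dictionary_char.insert c 1
    else dictionary_char.insert c (count + 1)) PySem.Dict.empty

def count_characters_4 (words : List String) (chars : String) : Int :=
  let dictionary_char := get_dictionary chars.toList
  words.foldl (fun length word =>
    let dictionary_word := get_dictionary word.toList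
    let word_length : Int := PySem.Str.len word
    let count := word.toList.foldl (fun count w =>
      if dictionary_char.getD w 0 ≥ dictionary_word.getD w 0 then count + 1 else count) (0 : Int)
    if count == word_length then length + word_length else length) 0

-- ===== PORT B =====
-- `all(c in it for c in sorted(word))` over `it = iter(pool)` is the greedy subsequence scan:
-- skip pool elements ≠ c, consume the match, fail when the iterator is exhausted — exactly
-- core Lean's List.isSublist on the two sorted lists.
def count_characters_4_alt (words : List String) (chars : String) : Int :=
  let pool := PySem.List.sorted chars.toList (fun c => c) false
  words.foldl (fun total word =>
    if (PySem.List.sorted word.toList (fun c => c) false).isSublist pool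
    then total + PySem.Str.len word else total) 0

-- ===== PRECONDITION & SPEC =====
def Spec_count_characters_4 (words : List String) (chars : String) (out : Int) : Prop := out = count_characters_4_alt words chars
instance (words : List String) (chars : String) (out : Int) : Decidable (Spec_count_characters_4 words chars out) := by unfold Spec_count_characters_4; infer_instance

-- ===== CLAIM (what is proved, stated in full; the proofs are below) =====
def Claim_equal_count_characters_4 : Prop := ∀ (words : List String) (chars : String), Dom_count_characters_4 words chars → Spec_count_characters_4 words chars (count_characters_4 words chars)

-- ===== LEMMAS AND PROOFS =====

-- A's helper builds exactly the character Counter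
theorem get_dictionary_eq_counter (l : List Char) :
    get_dictionary l = PySem.Dict.counter l := by
  rw [← PySem.Dict.foldl_insert_getD_add_one_eq_counter]
  unfold get_dictionary
  congr 1
  funext d c
  by_cases h : d.getD c 0 = 0 <;> simp [h]

-- A's per-word test holds iff the word's counts are covered by chars' counts
theorem a_cond_iff (chars word : String) :
    ((word.toList.foldl (fun count w =>
        if (get_dictionary chars.toList).getD w 0 ≥ (get_dictionary word.toList).getD w 0
        then count + 1 else count) (0 : Int)) == PySem.Str.len word) = true
    ↔ ∀ c ∈ word.toList, word.toList.count c ≤ chars.toList.count c := by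
  rw [get_dictionary_eq_counter, get_dictionary_eq_counter]
  have hc := PySem.List.foldl_count_if
      (fun w => decide ((PySem.Dict.counter chars.toList).getD w 0 ≥
        (PySem.Dict.counter word.toList).getD w 0)) word.toList (0 : Int)
  simp only [decide_eq_true_eq] at hc
  rw [hc]
  simp only [PySem.Str.len_eq, beq_iff_eq, zero_add, Nat.cast_inj]
  rw [List.countP_eq_length]
  constructor
  · intro h c hc
    have := h c hc
    simpa [PySem.Dict.getD_counter] using this
  · intro h c hc
    have := h c hc
    simpa [PySem.Dict.getD_counter] using this

-- B's per-word test (greedy scan of the sorted word through the sorted pool) holds iff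
-- the word's counts are covered by chars' counts
theorem b_cond_iff (chars word : String) :
    (PySem.List.sorted word.toList (fun c => c) false).isSublist
      (PySem.List.sorted chars.toList (fun c => c) false) = true
    ↔ ∀ c ∈ word.toList, word.toList.count c ≤ chars.toList.count c := by
  rw [List.isSublist_iff_sublist, ← List.subperm_ext_iff]
  constructor
  · intro h
    exact (((PySem.List.sorted_perm word.toList (fun c => c) false).symm.subperm.trans
      h.subperm).trans (PySem.List.sorted_perm chars.toList (fun c => c) false).subperm)
  · intro h
    refine List.sublist_of_subperm_of_pairwise (r := fun a b : Char => a ≤ b) ?_ ?_ ?_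
    · exact ((PySem.List.sorted_perm word.toList (fun c => c) false).subperm.trans h).trans
        (PySem.List.sorted_perm chars.toList (fun c => c) false).symm.subperm
    · exact PySem.List.sorted_pairwise word.toList (fun c => c)
    · exact PySem.List.sorted_pairwise chars.toList (fun c => c)

-- the two per-word conditions are the same Bool
theorem cond_eq (chars word : String) :
    ((word.toList.foldl (fun count w =>
        if (get_dictionary chars.toList).getD w 0 ≥ (get_dictionary word.toList).getD w 0
        then count + 1 else count) (0 : Int)) == PySem.Str.len word)
    = (PySem.List.sorted word.toList (fun c => c) false).isSublist
        (PySem.List.sorted chars.toList (fun c => c) false) := by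
  rw [Bool.eq_iff_iff, a_cond_iff, b_cond_iff]

-- ===== VERDICT (by name: the statement is the Claim_ definition above) =====
theorem count_characters_4_spec : Claim_equal_count_characters_4 := by
  intro words chars _
  unfold Spec_count_characters_4 count_characters_4 count_characters_4_alt
  simp only [cond_eq chars]
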